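-- pv_equiv track=rewrite | github.com/Gaon-Choi/codetree-TILs | 240925/Carry 피하기 2/escaping-carry-2.py | is_exists_carry
-- ===== SOURCE A (Python) =====
-- def is_exists_carry(num1, num2, num3):
--     n1 = str(num1); n2 = str(num2); n3 = str(num3)
--
--     max_size = max(len(n1), len(n2), len(n3))
--
--     n1 = '0' * (max_size - len(n1)) + n1
--     n2 = '0' * (max_size - len(n2)) + n2
--     n3 = '0' * (max_size - len(n3)) + n3
--
--     for i in range(max_size):
--         if int(n1[i]) + int(n2[i]) + int(n3[i]) > 10:
--             return True
--
--     return False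
-- ===== SOURCE B (Python) =====
-- def is_exists_carry(num1, num2, num3):
--     while num1 > 0 or num2 > 0 or num3 > 0:
--         if num1 % 10 + num2 % 10 + num3 % 10 > 10:
--             return True
--         num1 //= 10
--         num2 //= 10
--         num3 //= 10
--     return False
-- ===== Notes on version B (the rewrite author's own statement) =====
-- stated objective: idiomatic
-- what changed: B drops the string conversion and left-padding entirely and walks the digit columns least-significant-first with % 10 and // 10 on the numeric values.
-- outside the precondition, e.g. on is_exists_carry(-1, 999, 999): A returns True, B returns True
import Mathlib
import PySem

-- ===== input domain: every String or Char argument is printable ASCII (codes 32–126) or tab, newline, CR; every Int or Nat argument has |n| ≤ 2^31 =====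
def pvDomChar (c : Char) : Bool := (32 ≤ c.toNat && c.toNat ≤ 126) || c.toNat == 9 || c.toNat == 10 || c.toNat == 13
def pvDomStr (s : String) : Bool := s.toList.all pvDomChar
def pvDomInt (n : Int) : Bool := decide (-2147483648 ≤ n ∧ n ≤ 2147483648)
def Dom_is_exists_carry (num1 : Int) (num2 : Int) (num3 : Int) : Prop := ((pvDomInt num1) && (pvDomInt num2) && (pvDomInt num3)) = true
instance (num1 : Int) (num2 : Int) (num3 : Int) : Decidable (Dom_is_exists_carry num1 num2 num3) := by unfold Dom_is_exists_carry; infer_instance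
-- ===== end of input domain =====

-- B walks the digit columns least-significant-first with % 10 and // 10 on the numeric
-- values instead of building, left-padding and scanning decimal strings (idiomatic).

-- ===== PORT A =====
-- int(c) for the single character c = n[i] (inside Pre_ the character is always a digit)
def pvDigitInt (p : List Char) (i : Int) : Int :=
  (PySem.Int.ofChars? [PySem.List.pyGetD p i '0']).getD 0

def is_exists_carry (num1 : Int) (num2 : Int) (num3 : Int) : Bool :=
  let n1 := PySem.Int.toChars num1
  let n2 := PySem.Int.toChars num2
  let n3 := PySem.Int.toChars num3
  let maxSize := max (max n1.length n2.length) n3.length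
  let p1 := List.replicate (maxSize - n1.length) '0' ++ n1
  let p2 := List.replicate (maxSize - n2.length) '0' ++ n2
  let p3 := List.replicate (maxSize - n3.length) '0' ++ n3
  (PySem.List.pyRange 0 (maxSize : Int) 1).any (fun i =>
    pvDigitInt p1 i + pvDigitInt p2 i + pvDigitInt p3 i > 10)

-- ===== PORT B =====
-- the while loop; the fuel argument only makes the recursion structural: x // 10 strictly
-- shrinks x.toNat while some value is positive, so fuel > num1.toNat+num2.toNat+num3.toNat
-- is never exhausted (proved in pvLoop_eq below)
def pvAltLoop (fuel : Nat) (num1 : Int) (num2 : Int) (num3 : Int) : Bool :=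
  match fuel with
  | 0 => false
  | fuel + 1 =>
    if 0 < num1 ∨ 0 < num2 ∨ 0 < num3 then
      if PySem.Int.mod num1 10 + PySem.Int.mod num2 10 + PySem.Int.mod num3 10 > 10 then
        true
      else
        pvAltLoop fuel (PySem.Int.floordiv num1 10) (PySem.Int.floordiv num2 10)
          (PySem.Int.floordiv num3 10)
    else
      false

def is_exists_carry_alt (num1 : Int) (num2 : Int) (num3 : Int) : Bool :=
  pvAltLoop (num1.toNat + num2.toNat + num3.toNat + 1) num1 num2 num3

-- ===== PRECONDITION & SPEC =====
-- Pre_ excludes negative inputs: on them A raises ValueError (int('-') on the sign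
-- character) except when an earlier column already sums over 10, an accidental early True.
def Pre_is_exists_carry (num1 : Int) (num2 : Int) (num3 : Int) : Prop :=
  0 ≤ num1 ∧ 0 ≤ num2 ∧ 0 ≤ num3
instance (num1 : Int) (num2 : Int) (num3 : Int) : Decidable (Pre_is_exists_carry num1 num2 num3) := by
  unfold Pre_is_exists_carry; infer_instance

def pvWitness_is_exists_carry : Int × Int × Int := (27, 185, 9)

def Spec_is_exists_carry (num1 : Int) (num2 : Int) (num3 : Int) (out : Bool) : Prop :=
  out = is_exists_carry_alt num1 num2 num3
instance (num1 : Int) (num2 : Int) (num3 : Int) (out : Bool) : Decidable (Spec_is_exists_carry num1 num2 num3 out) := by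
  unfold Spec_is_exists_carry; infer_instance

-- ===== CLAIM (what is proved, stated in full; the proofs are below) =====
def Claim_equal_is_exists_carry : Prop := ∀ (num1 : Int) (num2 : Int) (num3 : Int), Dom_is_exists_carry num1 num2 num3 → Pre_is_exists_carry num1 num2 num3 → Spec_is_exists_carry num1 num2 num3 (is_exists_carry num1 num2 num3)

-- ===== LEMMAS AND PROOFS =====

-- the digit of n at power p (decimal, least-significant-first)
def pvD (p : Nat) (n : Nat) : Nat :=
  match p with
  | 0 => n % 10
  | p + 1 => pvD p (n / 10)

theorem pvD_lt (p n : Nat) : pvD p n < 10 := by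
  induction p generalizing n with
  | zero => simp [pvD]; omega
  | succ p ih => simpa [pvD] using ih (n / 10)

theorem pvD_zero_of_lt (p n : Nat) (h : n < 10 ^ p) : pvD p n = 0 := by
  induction p generalizing n with
  | zero => simp [pvD]; omega
  | succ p ih =>
    simp only [pvD]
    exact ih _ (by rw [pow_succ] at h; omega)

-- most-significant-first digit characters, the list Nat.toDigits produces
def pvMsd (n : Nat) : List Char :=
  if _h : n < 10 then [Nat.digitChar n]
  else pvMsd (n / 10) ++ [Nat.digitChar (n % 10)]
termination_by n
decreasing_by omega

theorem pvToDigitsCore_eq : ∀ (f n : Nat) (acc : List Char), n < f →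
    Nat.toDigitsCore 10 f n acc = pvMsd n ++ acc := by
  intro f
  induction f with
  | zero => omega
  | succ f ih =>
    intro n acc h
    rw [Nat.toDigitsCore]
    by_cases h10 : n < 10
    · have : n / 10 = 0 := Nat.div_eq_of_lt h10
      simp [this, pvMsd, h10, Nat.mod_eq_of_lt h10]
    · have hne : ¬ (n / 10 = 0) := by omega
      simp only [hne, if_false]
      rw [ih (n / 10) _ (by omega)]
      conv_rhs => rw [pvMsd]
      simp only [h10, dite_false, List.append_assoc, List.singleton_append]

theorem pvToChars_nonneg (a : Int) (h : 0 ≤ a) : PySem.Int.toChars a = pvMsd a.toNat := by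
  rw [PySem.Int.toChars]
  rw [if_neg (by omega)]
  exact (by simpa using pvToDigitsCore_eq (a.toNat + 1) a.toNat [] (by omega))

theorem pvMsd_bound (n : Nat) : n < 10 ^ (pvMsd n).length := by
  induction n using Nat.strong_induction_on with
  | _ n ih =>
    by_cases h : n < 10
    · rw [pvMsd]
      simp only [h, dite_true, List.length_singleton]
      omega
    · rw [pvMsd]
      have := ih (n / 10) (by omega)
      simp only [h, dite_false, List.length_append, List.length_singleton]
      rw [pow_succ]
      omega

theorem pvMsd_eq_map (n : Nat) :
    pvMsd n = ((List.range (pvMsd n).length).reverse).map (fun p => Nat.digitChar (pvD p n)) := by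
  induction n using Nat.strong_induction_on with
  | _ n ih =>
    by_cases h : n < 10
    · rw [pvMsd]
      simp [h, pvD, Nat.mod_eq_of_lt h]
    · rw [pvMsd]
      have ihn := ih (n / 10) (by omega)
      simp only [h, dite_false, List.length_append, List.length_singleton]
      rw [List.range_succ_eq_map]
      simp only [List.reverse_cons, List.map_append, List.map_map, List.map_reverse]
      conv_lhs => rw [ihn]
      simp only [List.map_reverse]
      have h1 : List.map ((fun p => (pvD p n).digitChar) ∘ Nat.succ) (List.range (pvMsd (n / 10)).length)
          = List.map (fun p => (pvD p (n / 10)).digitChar) (List.range (pvMsd (n / 10)).length) :=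
        List.map_congr_left (fun p _ => by simp [Function.comp, pvD])
      rw [h1]
      simp [pvD]

theorem pvPad_eq_map (n m : Nat) (h : (pvMsd n).length ≤ m) :
    List.replicate (m - (pvMsd n).length) '0' ++ pvMsd n
      = ((List.range m).reverse).map (fun p => Nat.digitChar (pvD p n)) := by
  induction m, h using Nat.le_induction with
  | base => simpa using pvMsd_eq_map n
  | succ m hm ih =>
    have hz : pvD m n = 0 := by
      apply pvD_zero_of_lt
      calc n < 10 ^ (pvMsd n).length := pvMsd_bound n
        _ ≤ 10 ^ m := Nat.pow_le_pow_right (by norm_num) hm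
    have hrep : m + 1 - (pvMsd n).length = (m - (pvMsd n).length) + 1 := by omega
    rw [hrep, List.replicate_succ, List.range_succ, List.reverse_append]
    simp only [List.reverse_cons, List.reverse_nil, List.nil_append,
      List.map_cons, List.cons_append, hz]
    rw [ih]
    rfl

theorem pvDigitInt_digitChar (d : Nat) (h : d < 10) :
    (PySem.Int.ofChars? [Nat.digitChar d]).getD 0 = (d : Int) := by
  interval_cases d <;> decide

theorem pvPad_digit (n m k : Nat) (hm : (pvMsd n).length ≤ m) (hk : k < m) :
    pvDigitInt (List.replicate (m - (pvMsd n).length) '0' ++ pvMsd n) (k : Int)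
      = (pvD (m - 1 - k) n : Int) := by
  rw [pvPad_eq_map n m hm]
  unfold pvDigitInt
  rw [PySem.List.pyGetD_natCast]
  rw [List.getD_eq_getElem _ _ (by simpa using hk)]
  rw [List.getElem_map, List.getElem_reverse, List.getElem_range]
  rw [List.length_range]
  exact pvDigitInt_digitChar _ (pvD_lt _ n)

theorem pvA_eq (num1 num2 num3 : Int) (h1 : 0 ≤ num1) (h2 : 0 ≤ num2) (h3 : 0 ≤ num3) :
    is_exists_carry num1 num2 num3 = true
      ↔ ∃ p, 10 < pvD p num1.toNat + pvD p num2.toNat + pvD p num3.toNat := by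
  unfold is_exists_carry
  rw [pvToChars_nonneg _ h1, pvToChars_nonneg _ h2, pvToChars_nonneg _ h3]
  simp only []
  set L1 := (pvMsd num1.toNat).length with hL1
  set L2 := (pvMsd num2.toNat).length with hL2
  set L3 := (pvMsd num3.toNat).length with hL3
  set m := max (max L1 L2) L3 with hm
  have hm1 : L1 ≤ m := by omega
  have hm2 : L2 ≤ m := by omega
  have hm3 : L3 ≤ m := by omega
  rw [PySem.List.pyRange_zero_nat, List.any_map, List.any_eq_true]
  constructor
  · rintro ⟨k, hk, hcond⟩
    rw [List.mem_range] at hk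
    simp only [Function.comp] at hcond
    rw [pvPad_digit _ _ _ hm1 hk, pvPad_digit _ _ _ hm2 hk, pvPad_digit _ _ _ hm3 hk] at hcond
    refine ⟨m - 1 - k, ?_⟩
    simp only [decide_eq_true_eq] at hcond
    exact_mod_cast hcond
  · rintro ⟨p, hp⟩
    have hpm : p < m := by
      by_contra hge
      have z1 : pvD p num1.toNat = 0 := pvD_zero_of_lt _ _
        (lt_of_lt_of_le (pvMsd_bound _) (Nat.pow_le_pow_right (by norm_num) (by omega)))
      have z2 : pvD p num2.toNat = 0 := pvD_zero_of_lt _ _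
        (lt_of_lt_of_le (pvMsd_bound _) (Nat.pow_le_pow_right (by norm_num) (by omega)))
      have z3 : pvD p num3.toNat = 0 := pvD_zero_of_lt _ _
        (lt_of_lt_of_le (pvMsd_bound _) (Nat.pow_le_pow_right (by norm_num) (by omega)))
      omega
    refine ⟨m - 1 - p, List.mem_range.mpr (by omega), ?_⟩
    simp only [Function.comp]
    have hk : m - 1 - p < m := by omega
    rw [pvPad_digit _ _ _ hm1 hk, pvPad_digit _ _ _ hm2 hk, pvPad_digit _ _ _ hm3 hk]
    have hpe : m - 1 - (m - 1 - p) = p := by omega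
    rw [hpe]
    simp only [decide_eq_true_eq]
    exact_mod_cast hp

theorem pvMod_toNat (a : Int) (h : 0 ≤ a) : PySem.Int.mod a 10 = ((a.toNat % 10 : Nat) : Int) := by
  rw [PySem.Int.mod_eq_emod_of_pos (by norm_num)]
  omega

theorem pvDiv_toNat (a : Int) (h : 0 ≤ a) : (PySem.Int.floordiv a 10).toNat = a.toNat / 10 := by
  rw [PySem.Int.floordiv_eq_ediv_of_pos (by norm_num)]
  omega

theorem pvDiv_nonneg (a : Int) (h : 0 ≤ a) : 0 ≤ PySem.Int.floordiv a 10 := by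
  rw [PySem.Int.floordiv_eq_ediv_of_pos (by norm_num)]
  omega

-- x // 10 does not grow x.toNat, and strictly shrinks it when 0 < x
theorem pvAlt_dec (x : Int) : (PySem.Int.floordiv x 10).toNat ≤ x.toNat ∧
    (0 < x → (PySem.Int.floordiv x 10).toNat < x.toNat) := by
  constructor
  · by_cases hx : 0 ≤ x
    · rw [PySem.Int.floordiv_eq_ediv_of_pos (by norm_num)]
      omega
    · have h : PySem.Int.floordiv x 10 < 0 := by
        have := PySem.Int.floordiv_mul_add_mod x 10
        have h1 := PySem.Int.mod_nonneg x (b := 10) (by norm_num)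
        nlinarith [this, h1]
      omega
  · intro hx
    rw [PySem.Int.floordiv_eq_ediv_of_pos (by norm_num)]
    omega

theorem pvLoop_eq (fuel : Nat) : ∀ (num1 num2 num3 : Int), 0 ≤ num1 → 0 ≤ num2 → 0 ≤ num3 →
    num1.toNat + num2.toNat + num3.toNat < fuel →
    (pvAltLoop fuel num1 num2 num3 = true
      ↔ ∃ p, 10 < pvD p num1.toNat + pvD p num2.toNat + pvD p num3.toNat) := by
  induction fuel with
  | zero => omega
  | succ fuel ih =>
  intro num1 num2 num3 h1 h2 h3 hf
  rw [pvAltLoop]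
  by_cases hc : 0 < num1 ∨ 0 < num2 ∨ 0 < num3
  · simp only [hc, if_true]
    by_cases hm : PySem.Int.mod num1 10 + PySem.Int.mod num2 10 + PySem.Int.mod num3 10 > 10
    · simp only [hm, if_true, true_iff]
      refine ⟨0, ?_⟩
      rw [pvMod_toNat _ h1, pvMod_toNat _ h2, pvMod_toNat _ h3] at hm
      simp only [pvD]
      omega
    · simp only [hm, if_false]
      have hnot0 : ¬ 10 < pvD 0 num1.toNat + pvD 0 num2.toNat + pvD 0 num3.toNat := by
        rw [pvMod_toNat _ h1, pvMod_toNat _ h2, pvMod_toNat _ h3] at hm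
        simp only [pvD]
        omega
      have hdec : (PySem.Int.floordiv num1 10).toNat + (PySem.Int.floordiv num2 10).toNat
          + (PySem.Int.floordiv num3 10).toNat < fuel := by
        rcases hc with h | h | h <;>
          have a1 := pvAlt_dec num1 <;> have a2 := pvAlt_dec num2 <;> have a3 := pvAlt_dec num3 <;>
          omega
      rw [ih _ _ _ (pvDiv_nonneg _ h1) (pvDiv_nonneg _ h2) (pvDiv_nonneg _ h3) hdec]
      rw [pvDiv_toNat _ h1, pvDiv_toNat _ h2, pvDiv_toNat _ h3]
      constructor
      · rintro ⟨p, hp⟩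
        exact ⟨p + 1, by simpa [pvD] using hp⟩
      · rintro ⟨p, hp⟩
        cases p with
        | zero => exact absurd hp hnot0
        | succ p => exact ⟨p, by simpa [pvD] using hp⟩
  · simp only [hc, if_false]
    rw [show (false = true) = False by simp]
    rw [false_iff]
    have e1 : num1.toNat = 0 := by omega
    have e2 : num2.toNat = 0 := by omega
    have e3 : num3.toNat = 0 := by omega
    rintro ⟨p, hp⟩
    rw [e1, e2, e3] at hp
    have : ∀ q, pvD q 0 = 0 := by
      intro q; induction q with
      | zero => simp [pvD]
      | succ q ihq => simpa [pvD] using ihq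
    rw [this p] at hp
    omega

-- ===== VERDICT (by name: the statement is the Claim_ definition above) =====
theorem is_exists_carry_spec : Claim_equal_is_exists_carry := by
  intro n1 n2 n3 _ ⟨h1, h2, h3⟩
  unfold Spec_is_exists_carry is_exists_carry_alt
  rw [Bool.eq_iff_iff, pvA_eq n1 n2 n3 h1 h2 h3,
    pvLoop_eq _ n1 n2 n3 h1 h2 h3 (by omega)]
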